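-- pv_equiv track=rewrite | github.com/UncoderIO/Uncoder_IO | uncoder-core/app/translator/platforms/logrhythm_axon/renders/logrhythm_axon_query.py | __regex_to_str_list
-- ===== SOURCE A (Python) =====
-- from typing import Union
--
-- def __regex_to_str_list(value: Union[int, str]) -> list[list[str]]:  # noqa: PLR0912
--     value_groups = []
--
--     stack = []  # [(element: str, escaped: bool)]
--
--     for char in value:
--         if char == "\\":
--             if stack and stack[-1][0] == "\\" and stack[-1][1] is False:
--                 stack.pop()
--                 stack.append((char, True))
--             else:
--                 stack.append(("\\", False))
--         elif char == "|":
--             if stack and stack[-1][0] == "\\" and stack[-1][1] is False: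
--                 stack.pop()
--                 stack.append((char, True))
--             elif stack:
--                 value_groups.append("".join(element[0] for element in stack))
--                 stack = []
--         else:
--             stack.append((char, False))
--     if stack:
--         value_groups.append("".join(element[0] for element in stack if element[0] != "\\" or element[-1] is True))
--
--     joined_components = []
--     for value_group in value_groups:
--         inner_joined_components = []
--         not_joined_components = []
--         for i in range(len(value_group)):
--             if value_group[i] == "*" and i > 0 and value_group[i - 1] != "\\":
--                 inner_joined_components.append("".join(not_joined_components))
--                 not_joined_components = []
--             else:
--                 not_joined_components.append(value_group[i])
--         if not_joined_components:
--             inner_joined_components.append("".join(not_joined_components))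
--         joined_components.append(inner_joined_components)
--
--     return joined_components
-- ===== SOURCE B (Python) =====
-- def __regex_to_str_list(value):
--     def split_group(pairs):
--         out, tok, prev = [], [], None
--         for c, _escaped in pairs:
--             if c == "*" and prev is not None and prev != "\\":
--                 out.append("".join(tok))
--                 tok = []
--             else:
--                 tok.append(c)
--             prev = c
--         if tok:
--             out.append("".join(tok))
--         return out
--
--     groups = []
--     group = []          # collapsed (char, escaped) pairs of the current group
--     pending = False     # an unescaped backslash waiting for its next char
--     for ch in value:
--         if pending:
--             pending = False
--             if ch in ("\\", "|"):
--                 group.append((ch, True))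
--                 continue
--             group.append(("\\", False))
--         if ch == "\\":
--             pending = True
--         elif ch == "|":
--             if group:
--                 groups.append(split_group(group))
--                 group = []
--         else:
--             group.append((ch, False))
--     if pending:
--         group.append(("\\", False))
--     if group:
--         groups.append(split_group([p for p in group if p[0] != "\\" or p[1]]))
--     return groups
-- ===== Notes on version B (the rewrite author's own statement) =====
-- stated objective: alternative
-- what changed: Replaces A's three-phase pipeline (stack with pop/re-push escape collapsing, intermediate group strings, then an index-based second loop splitting on '*') by a single forward scan with a pending-escape flag that emits collapsed (char,escaped) pairs and splits each group at flush time with a prev-char fold, so no stack mutation and no intermediate joined strings or index arithmetic.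
import Mathlib
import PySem

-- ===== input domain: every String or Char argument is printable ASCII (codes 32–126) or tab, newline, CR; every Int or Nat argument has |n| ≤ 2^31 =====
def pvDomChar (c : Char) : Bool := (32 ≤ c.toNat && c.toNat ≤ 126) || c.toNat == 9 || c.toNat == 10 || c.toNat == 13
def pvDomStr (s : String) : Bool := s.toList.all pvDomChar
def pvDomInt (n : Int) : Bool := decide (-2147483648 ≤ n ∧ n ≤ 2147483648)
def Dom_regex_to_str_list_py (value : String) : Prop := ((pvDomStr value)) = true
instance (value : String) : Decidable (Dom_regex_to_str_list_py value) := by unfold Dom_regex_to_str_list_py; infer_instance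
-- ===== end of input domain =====

-- B replaces A's stack+intermediate-strings+index-loop pipeline by one scan with a
-- pending-escape flag, splitting groups at flush time (alternative decomposition, same cost).

-- ===== PORT A =====
-- A's stack is stored top-first (cons = push); Python's stack order is `.reverse`.
-- Second pass of A: split a collapsed group on '*' when i > 0 and g[i-1] != '\\'.
def pvA_split (g : List Char) : List String :=
  let r := (List.range g.length).foldl
    (fun (acc : List String × List Char) i =>
      if g.getD i ' ' = '*' ∧ 0 < i ∧ g.getD (i - 1) ' ' ≠ '\\' then
        (acc.1 ++ [String.mk acc.2], [])
      else (acc.1, acc.2 ++ [g.getD i ' '])) ([], [])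
  if r.2 ≠ [] then r.1 ++ [String.mk r.2] else r.1

def pvA_step (st : List (List Char) × List (Char × Bool)) (c : Char) :
    List (List Char) × List (Char × Bool) :=
  if c = '\\' then
    if st.2.head? = some ('\\', false) then (st.1, ('\\', true) :: st.2.tail)
    else (st.1, ('\\', false) :: st.2)
  else if c = '|' then
    if st.2.head? = some ('\\', false) then (st.1, ('|', true) :: st.2.tail)
    else if st.2 ≠ [] then (st.1 ++ [st.2.reverse.map Prod.fst], [])
    else st
  else (st.1, (c, false) :: st.2)

def regex_to_str_list_py (value : String) : List (List String) :=
  let r := value.toList.foldl pvA_step ([], [])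
  let groups :=
    if r.2 ≠ [] then
      r.1 ++ [((r.2.reverse.filter fun p => p.1 ≠ '\\' ∨ p.2 = true).map Prod.fst)]
    else r.1
  groups.map pvA_split

-- ===== PORT B =====
-- split_group of Source B: fold over the pairs carrying (out, tok, prev).
def pvB_split (pairs : List (Char × Bool)) : List String :=
  let r := pairs.foldl
    (fun (acc : List String × List Char × Option Char) p =>
      if p.1 = '*' ∧ acc.2.2.isSome ∧ acc.2.2 ≠ some '\\' then
        (acc.1 ++ [String.mk acc.2.1], [], some p.1)
      else (acc.1, acc.2.1 ++ [p.1], some p.1)) ([], [], none)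
  if r.2.1 ≠ [] then r.1 ++ [String.mk r.2.1] else r.1

-- the non-pending part of Source B's loop body (reached directly or after resolving a pending backslash)
def pvB_handle (groups : List (List String)) (group : List (Char × Bool)) (ch : Char) :
    List (List String) × List (Char × Bool) × Bool :=
  if ch = '\\' then (groups, group, true)
  else if ch = '|' then
    if group ≠ [] then (groups ++ [pvB_split group], [], false)
    else (groups, group, false)
  else (groups, group ++ [(ch, false)], false)

def pvB_step (st : List (List String) × List (Char × Bool) × Bool) (ch : Char) :
    List (List String) × List (Char × Bool) × Bool :=
  if st.2.2 then
    if ch = '\\' ∨ ch = '|' then (st.1, st.2.1 ++ [(ch, true)], false)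
    else pvB_handle st.1 (st.2.1 ++ [('\\', false)]) ch
  else pvB_handle st.1 st.2.1 ch

def regex_to_str_list_py_alt (value : String) : List (List String) :=
  let r := value.toList.foldl pvB_step ([], [], false)
  let group := if r.2.2 then r.2.1 ++ [('\\', false)] else r.2.1
  if group ≠ [] then
    r.1 ++ [pvB_split (group.filter fun p => p.1 ≠ '\\' ∨ p.2 = true)]
  else r.1

-- ===== PRECONDITION & SPEC =====
def Spec_regex_to_str_list_py (value : String) (out : List (List String)) : Prop := out = regex_to_str_list_py_alt value
instance (value : String) (out : List (List String)) : Decidable (Spec_regex_to_str_list_py value out) := by unfold Spec_regex_to_str_list_py; infer_instance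

-- ===== CLAIM (what is proved, stated in full; the proofs are below) =====
def Claim_equal_regex_to_str_list_py : Prop := ∀ (value : String), Dom_regex_to_str_list_py value → Spec_regex_to_str_list_py value (regex_to_str_list_py value)

-- ===== LEMMAS AND PROOFS =====

-- reference splitter: structural recursion carrying the previous character
def pvRefSplit (prev : Option Char) (out : List String) (tok : List Char) : List Char → List String
  | [] => if tok ≠ [] then out ++ [String.mk tok] else out
  | c :: rest =>
    if c = '*' ∧ prev.isSome ∧ prev ≠ some '\\' then
      pvRefSplit (some c) (out ++ [String.mk tok]) [] rest
    else pvRefSplit (some c) out (tok ++ [c]) rest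

lemma pvB_split_eq_ref (pairs : List (Char × Bool)) :
    ∀ (out : List String) (tok : List Char) (prev : Option Char),
    (let r := pairs.foldl
      (fun (acc : List String × List Char × Option Char) p =>
        if p.1 = '*' ∧ acc.2.2.isSome ∧ acc.2.2 ≠ some '\\' then
          (acc.1 ++ [String.mk acc.2.1], [], some p.1)
        else (acc.1, acc.2.1 ++ [p.1], some p.1)) (out, tok, prev)
     if r.2.1 ≠ [] then r.1 ++ [String.mk r.2.1] else r.1)
    = pvRefSplit prev out tok (pairs.map Prod.fst) := by
  induction pairs with
  | nil => intro out tok prev; simp [pvRefSplit]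
  | cons p rest ih =>
    intro out tok prev
    simp only [List.foldl_cons, List.map_cons, pvRefSplit]
    by_cases h : p.1 = '*' ∧ prev.isSome ∧ prev ≠ some '\\'
    · simp only [if_pos h]; exact ih _ _ _
    · simp only [if_neg h]; exact ih _ _ _

lemma pvA_split_eq_ref_aux (s : List Char) :
    ∀ (m k : ℕ) (out : List String) (tok : List Char) (prev : Option Char),
    m = s.length - k → k ≤ s.length →
    prev = (if k = 0 then none else some (s.getD (k - 1) ' ')) →
    (let r := (List.range' k m).foldl
      (fun (acc : List String × List Char) i =>
        if s.getD i ' ' = '*' ∧ 0 < i ∧ s.getD (i - 1) ' ' ≠ '\\' then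
          (acc.1 ++ [String.mk acc.2], [])
        else (acc.1, acc.2 ++ [s.getD i ' '])) (out, tok)
     if r.2 ≠ [] then r.1 ++ [String.mk r.2] else r.1)
    = pvRefSplit prev out tok (s.drop k) := by
  intro m
  induction m with
  | zero =>
    intro k out tok prev hm hk hp
    have : k = s.length := by omega
    subst this
    simp [pvRefSplit]
  | succ m ih =>
    intro k out tok prev hm hk hp
    have hklt : k < s.length := by omega
    have hdrop : s.drop k = s[k] :: s.drop (k + 1) :=
      List.drop_eq_getElem_cons hklt
    have hget : s.getD k ' ' = s[k] := by
      simp [List.getD, List.getElem?_eq_getElem hklt]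
    simp only [List.range'_succ, List.foldl_cons, hdrop, pvRefSplit]
    rw [hget]
    have hcond : (s[k] = '*' ∧ 0 < k ∧ s.getD (k - 1) ' ' ≠ '\\')
        ↔ (s[k] = '*' ∧ prev.isSome ∧ prev ≠ some '\\') := by
      rcases Nat.eq_zero_or_pos k with hk0 | hk0
      · subst hk0; simp [hp]
      · have hne0 : k ≠ 0 := by omega
        have hget1 : s.getD (k - 1) ' ' = s[k - 1]'(by omega) := by
          simp [List.getD, List.getElem?_eq_getElem (show k - 1 < s.length by omega)]
        rw [hp, if_neg hne0, hget1]
        simp [hk0]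
    by_cases h : s[k] = '*' ∧ prev.isSome ∧ prev ≠ some '\\'
    · rw [if_pos (hcond.mpr h), if_pos h]
      exact ih (k + 1) _ _ (some s[k]) (by omega) (by omega)
        (by rw [if_neg (Nat.succ_ne_zero k), Nat.add_sub_cancel, hget])
    · rw [if_neg (fun hc => h (hcond.mp hc)), if_neg h]
      exact ih (k + 1) _ _ (some s[k]) (by omega) (by omega)
        (by rw [if_neg (Nat.succ_ne_zero k), Nat.add_sub_cancel, hget])

lemma pvA_split_eq_pvB_split (g : List (Char × Bool)) :
    pvA_split (g.map Prod.fst) = pvB_split g := by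
  have hA := pvA_split_eq_ref_aux (g.map Prod.fst) (g.map Prod.fst).length 0 [] [] none
    (by simp) (by simp) (by simp)
  have hB := pvB_split_eq_ref g [] [] none
  simp only [List.drop_zero] at hA
  rw [pvA_split, pvB_split]
  rw [List.range_eq_range']
  exact hA.trans hB.symm

-- main scan invariant: A's (groups, stack) tracks B's (groups, group, pending)
lemma pv_scan_inv (cs : List Char) :
    ∀ (gA : List (List Char)) (gB : List (List String))
      (group : List (Char × Bool)) (pending : Bool),
    gB = gA.map pvA_split →
    (pending = false → group.getLast? ≠ some ('\\', false)) →
    (let rA := cs.foldl pvA_step (gA, if pending then ('\\', false) :: group.reverse else group.reverse)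
     let rB := cs.foldl pvB_step (gB, group, pending)
     rB.1 = rA.1.map pvA_split ∧
     rA.2 = (if rB.2.2 then ('\\', false) :: rB.2.1.reverse else rB.2.1.reverse) ∧
     (rB.2.2 = false → rB.2.1.getLast? ≠ some ('\\', false))) := by
  induction cs with
  | nil =>
    intro gA gB group pending hg hl
    exact ⟨by simp [hg], rfl, hl⟩
  | cons c rest ih =>
    intro gA gB group pending hg hl
    simp only [List.foldl_cons]
    by_cases hpend : pending = true
    · subst hpend
      rw [show (if (true : Bool) then ('\\', false) :: group.reverse else group.reverse)
            = ('\\', false) :: group.reverse from rfl]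
      by_cases hbs : c = '\\'
      · subst hbs
        have hA : pvA_step (gA, ('\\', false) :: group.reverse) '\\'
            = (gA, ('\\', true) :: group.reverse) := by
          simp [pvA_step]
        have hB : pvB_step (gB, group, true) '\\'
            = (gB, group ++ [('\\', true)], false) := by
          simp [pvB_step]
        rw [hA, hB]
        have := ih gA gB (group ++ [('\\', true)]) false hg (by simp)
        simpa using this
      · by_cases hp : c = '|'
        · subst hp
          have hA : pvA_step (gA, ('\\', false) :: group.reverse) '|'
              = (gA, ('|', true) :: group.reverse) := by
            simp [pvA_step]
          have hB : pvB_step (gB, group, true) '|'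
              = (gB, group ++ [('|', true)], false) := by
            simp [pvB_step]
          rw [hA, hB]
          have := ih gA gB (group ++ [('|', true)]) false hg (by simp)
          simpa using this
        · have hA : pvA_step (gA, ('\\', false) :: group.reverse) c
              = (gA, (c, false) :: ('\\', false) :: group.reverse) := by
            simp [pvA_step, hbs, hp]
          have hB : pvB_step (gB, group, true) c
              = (gB, group ++ [('\\', false), (c, false)], false) := by
            simp [pvB_step, pvB_handle, hbs, hp]
          rw [hA, hB]
          have := ih gA gB (group ++ [('\\', false), (c, false)]) false hg
            (by simp [hbs])
          simpa using this
    · have hpend' : pending = false := by simpa using hpend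
      subst hpend'
      rw [show (if (false : Bool) then ('\\', false) :: group.reverse else group.reverse)
            = group.reverse from rfl]
      have hlast : group.getLast? ≠ some ('\\', false) := hl rfl
      have hhead : group.reverse.head? ≠ some ('\\', false) := by
        rw [List.head?_reverse]; exact hlast
      by_cases hbs : c = '\\'
      · subst hbs
        have hA : pvA_step (gA, group.reverse) '\\'
            = (gA, ('\\', false) :: group.reverse) := by
          simp [pvA_step, hlast]
        have hB : pvB_step (gB, group, false) '\\' = (gB, group, true) := by
          simp [pvB_step, pvB_handle]
        rw [hA, hB]
        have := ih gA gB group true hg (by simp)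
        simpa using this
      · by_cases hp : c = '|'
        · subst hp
          by_cases hne : group = []
          · subst hne
            have hA : pvA_step (gA, ([] : List (Char × Bool)).reverse) '|'
                = (gA, ([] : List (Char × Bool)).reverse) := by
              simp [pvA_step]
            have hB : pvB_step (gB, ([] : List (Char × Bool)), false) '|'
                = (gB, [], false) := by
              simp [pvB_step, pvB_handle]
            rw [hA, hB]
            have := ih gA gB [] false hg (by simp)
            simpa using this
          · have hA : pvA_step (gA, group.reverse) '|'
                = (gA ++ [group.map Prod.fst], []) := by
              simp [pvA_step, hlast, hne]
            have hB : pvB_step (gB, group, false) '|'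
                = (gB ++ [pvB_split group], [], false) := by
              simp [pvB_step, pvB_handle, hne]
            rw [hA, hB]
            have hg' : gB ++ [pvB_split group]
                = (gA ++ [group.map Prod.fst]).map pvA_split := by
              simp [hg, pvA_split_eq_pvB_split]
            have := ih (gA ++ [group.map Prod.fst]) (gB ++ [pvB_split group]) [] false hg' (by simp)
            simpa using this
        · have hA : pvA_step (gA, group.reverse) c
              = (gA, (c, false) :: group.reverse) := by
            simp [pvA_step, hbs, hp]
          have hB : pvB_step (gB, group, false) c
              = (gB, group ++ [(c, false)], false) := by
            simp [pvB_step, pvB_handle, hbs, hp]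
          rw [hA, hB]
          have := ih gA gB (group ++ [(c, false)]) false hg (by simp [hbs])
          simpa using this

-- ===== VERDICT (by name: the statement is the Claim_ definition above) =====
theorem regex_to_str_list_py_spec : Claim_equal_regex_to_str_list_py := by
  intro value _hdom
  show regex_to_str_list_py value = regex_to_str_list_py_alt value
  have hinv := pv_scan_inv value.toList [] [] [] false rfl (by simp)
  simp only [List.reverse_nil, Bool.false_eq_true, if_false] at hinv
  obtain ⟨h1, h2, h3⟩ := hinv
  rw [regex_to_str_list_py, regex_to_str_list_py_alt]
  set rA := value.toList.foldl pvA_step ([], []) with hrA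
  set rB := value.toList.foldl pvB_step ([], [], false) with hrB
  by_cases hp : rB.2.2 = true
  · rw [hp] at h2
    rw [show (if (true : Bool) then ('\\', false) :: rB.2.1.reverse else rB.2.1.reverse)
          = ('\\', false) :: rB.2.1.reverse from rfl] at h2
    have hstack : rA.2 = (rB.2.1 ++ [('\\', false)]).reverse := by rw [h2]; simp
    have hne : rA.2 ≠ [] := by rw [hstack]; simp
    rw [hp]
    rw [show (if (true : Bool) then rB.2.1 ++ [('\\', false)] else rB.2.1)
          = rB.2.1 ++ [('\\', false)] from rfl]
    rw [if_pos hne, if_pos (by simp : rB.2.1 ++ [('\\', false)] ≠ ([] : List (Char × Bool)))]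
    rw [List.map_append, h1, hstack, List.reverse_reverse]
    congr 1
    simp only [List.map_cons, List.map_nil, pvA_split_eq_pvB_split]
  · have hp' : rB.2.2 = false := by simpa using hp
    rw [hp'] at h2
    rw [show (if (false : Bool) then ('\\', false) :: rB.2.1.reverse else rB.2.1.reverse)
          = rB.2.1.reverse from rfl] at h2
    rw [hp']
    rw [show (if (false : Bool) then rB.2.1 ++ [('\\', false)] else rB.2.1)
          = rB.2.1 from rfl]
    by_cases hne : rB.2.1 = []
    · have hAne : rA.2 = [] := by rw [h2, hne]; rfl
      rw [if_neg (by simp [hAne]), if_neg (by simp [hne]), h1]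
    · have hAne : rA.2 ≠ [] := by rw [h2]; simpa using hne
      rw [if_pos hAne, if_pos hne, List.map_append, h1, h2, List.reverse_reverse]
      congr 1
      simp only [List.map_cons, List.map_nil, pvA_split_eq_pvB_split]
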